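-- pv_equiv track=rewrite | github.com/danieltanner44/Python_Programming | Advent_of_Code/Advent_of_Code_2021/Day2/main_part1.py | assess_movement
-- ===== SOURCE A (Python) =====
-- def assess_movement(direction_pairs):
--     position = [0,0] # [H,V]
--     for movement in direction_pairs:
--         if movement[0] == "forward":
--             position[0] += movement[1]
--         elif movement[0] == "up":
--             position[1] -= movement[1]
--         elif movement[0] == "down":
--             position[1] += movement[1]
--     result_multiple = position[0] * position[1]
--     return result_multiple
-- ===== SOURCE B (Python) =====
-- def assess_movement(direction_pairs):
--     horizontal = sum(m[1] for m in direction_pairs if m[0] == "forward")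
--     vertical = (sum(m[1] for m in direction_pairs if m[0] == "down")
--                 - sum(m[1] for m in direction_pairs if m[0] == "up"))
--     return horizontal * vertical
-- ===== Notes on version B (the rewrite author's own statement) =====
-- stated objective: idiomatic
-- what changed: Replaces the single branching loop over a mutable position list with three filtered sums (forward, down, up) combined arithmetically.
import Mathlib
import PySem

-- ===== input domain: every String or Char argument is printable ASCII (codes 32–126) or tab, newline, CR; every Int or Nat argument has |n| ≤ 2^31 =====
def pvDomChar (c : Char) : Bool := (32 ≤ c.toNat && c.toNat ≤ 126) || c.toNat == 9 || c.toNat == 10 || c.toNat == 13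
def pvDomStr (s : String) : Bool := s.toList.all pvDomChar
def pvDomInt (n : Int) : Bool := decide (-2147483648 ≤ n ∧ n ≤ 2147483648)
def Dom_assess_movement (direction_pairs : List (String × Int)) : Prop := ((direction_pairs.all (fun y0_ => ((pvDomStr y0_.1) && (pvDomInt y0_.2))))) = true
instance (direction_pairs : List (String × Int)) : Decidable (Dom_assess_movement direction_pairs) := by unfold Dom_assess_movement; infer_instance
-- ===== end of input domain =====

-- ===== PORT A =====
-- B replaces A's single branching loop with three filtered sums.
def assess_movement (direction_pairs : List (String × Int)) : Int :=
  let position := direction_pairs.foldl (fun (position : Int × Int) movement =>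
    if movement.1 == "forward" then (position.1 + movement.2, position.2)
    else if movement.1 == "up" then (position.1, position.2 - movement.2)
    else if movement.1 == "down" then (position.1, position.2 + movement.2)
    else position) (0, 0)
  position.1 * position.2

-- ===== PORT B =====
def assess_movement_alt (direction_pairs : List (String × Int)) : Int :=
  let horizontal := ((direction_pairs.filter (fun m => m.1 == "forward")).map (·.2)).sum
  let vertical := ((direction_pairs.filter (fun m => m.1 == "down")).map (·.2)).sum
                  - ((direction_pairs.filter (fun m => m.1 == "up")).map (·.2)).sum
  horizontal * vertical

-- ===== PRECONDITION & SPEC =====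
def Spec_assess_movement (direction_pairs : List (String × Int)) (out : Int) : Prop := out = assess_movement_alt direction_pairs
instance (direction_pairs : List (String × Int)) (out : Int) : Decidable (Spec_assess_movement direction_pairs out) := by unfold Spec_assess_movement; infer_instance

-- ===== CLAIM (what is proved, stated in full; the proofs are below) =====
def Claim_equal_assess_movement : Prop := ∀ (direction_pairs : List (String × Int)), Dom_assess_movement direction_pairs → Spec_assess_movement direction_pairs (assess_movement direction_pairs)

-- ===== LEMMAS AND PROOFS =====

-- ===== VERDICT (by name: the statement is the Claim_ definition above) =====
lemma foldl_state (direction_pairs : List (String × Int)) (h v : Int) :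
    direction_pairs.foldl (fun (position : Int × Int) movement =>
      if movement.1 == "forward" then (position.1 + movement.2, position.2)
      else if movement.1 == "up" then (position.1, position.2 - movement.2)
      else if movement.1 == "down" then (position.1, position.2 + movement.2)
      else position) (h, v) =
    (h + ((direction_pairs.filter (fun m => m.1 == "forward")).map (·.2)).sum,
     v + ((direction_pairs.filter (fun m => m.1 == "down")).map (·.2)).sum
       - ((direction_pairs.filter (fun m => m.1 == "up")).map (·.2)).sum) := by
  induction direction_pairs generalizing h v with
  | nil => simp
  | cons x xs ih =>
    simp only [List.foldl_cons, List.filter_cons]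
    by_cases hf : x.1 == "forward" <;> by_cases hu : x.1 == "up" <;>
      by_cases hd : x.1 == "down" <;>
      simp_all <;> ring

theorem assess_movement_spec : Claim_equal_assess_movement := by
  intro xs _
  unfold Spec_assess_movement assess_movement assess_movement_alt
  rw [foldl_state]
  simp
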